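-- pv_equiv track=rewrite | github.com/FelipeSilvestre04/IC | Algoritimos/Metaheuristicas/RKGA/Main/RKGA.py | area_fecho_retangular
-- ===== SOURCE A (Python) =====
-- def area_fecho_retangular(poligonos):
--     # Inicializar valores mínimos e máximos
--     min_x = float('inf')
--     max_x = float('-inf')
--     min_y = float('inf')
--     max_y = float('-inf')
--
--     # Iterar sobre todos os vértices de todos os polígonos
--     for poligono in poligonos:
--         for (x, y) in poligono:
--             # Atualizar os valores mínimos e máximos de x e y
--             if x < min_x:
--                 min_x = x
--             if x > max_x:
--                 max_x = x
--             if y < min_y: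
--                 min_y = y
--             if y > max_y:
--                 max_y = y
--
--     # Calcular a largura e altura do fecho retangular
--     largura = max_x - min_x
--     altura = max_y - min_y
--
--     # Calcular a área do fecho retangular
--     area = largura * altura
--
--     return area
-- ===== SOURCE B (Python) =====
-- def area_fecho_retangular(poligonos):
--     xs = sorted(x for poligono in poligonos for (x, y) in poligono)
--     ys = sorted(y for poligono in poligonos for (x, y) in poligono)
--     return (xs[-1] - xs[0]) * (ys[-1] - ys[0])
-- ===== Notes on version B (the rewrite author's own statement) =====
-- stated objective: alternative
-- what changed: A's fused pass that updates four running extrema with if-chains is replaced by sorting the flattened x- and y-coordinate lists and reading the extrema off the sorted lists' endpoints (xs[0]/xs[-1]).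
-- outside the precondition, e.g. on area_fecho_retangular([]): A returns inf, B raises IndexError; on area_fecho_retangular([[]]): A returns inf, B raises IndexError
import Mathlib
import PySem

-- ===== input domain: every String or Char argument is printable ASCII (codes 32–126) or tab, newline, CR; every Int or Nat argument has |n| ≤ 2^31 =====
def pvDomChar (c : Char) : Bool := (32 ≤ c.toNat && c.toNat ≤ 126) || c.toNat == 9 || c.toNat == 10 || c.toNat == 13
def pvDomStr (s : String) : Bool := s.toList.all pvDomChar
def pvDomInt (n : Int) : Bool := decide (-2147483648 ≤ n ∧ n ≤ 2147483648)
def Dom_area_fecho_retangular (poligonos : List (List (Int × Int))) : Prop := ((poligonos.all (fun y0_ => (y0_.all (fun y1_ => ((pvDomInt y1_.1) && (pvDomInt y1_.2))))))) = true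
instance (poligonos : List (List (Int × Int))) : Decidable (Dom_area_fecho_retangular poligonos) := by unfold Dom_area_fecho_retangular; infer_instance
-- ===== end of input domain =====

-- B replaces A's fused min/max-updating pass by sorting the flattened x- and y-coordinate
-- lists and reading the extrema off the sorted lists' endpoints — a different algorithm
-- (sort-then-pick, O(n log n)) of the same exact value.


-- ===== PORT A =====
-- A's running state: (min_x, max_x, min_y, max_y); 'none' models the initial ±inf sentinels.
def pvLtMin (x : Int) (m : Option Int) : Bool := match m with | none => true | some m => decide (x < m)
def pvGtMax (x : Int) (m : Option Int) : Bool := match m with | none => true | some m => decide (m < x)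

def pvStepA (st : Option Int × Option Int × Option Int × Option Int) (v : Int × Int) :
    Option Int × Option Int × Option Int × Option Int :=
  let mnx := if pvLtMin v.1 st.1 then some v.1 else st.1
  let mxx := if pvGtMax v.1 st.2.1 then some v.1 else st.2.1
  let mny := if pvLtMin v.2 st.2.2.1 then some v.2 else st.2.2.1
  let mxy := if pvGtMax v.2 st.2.2.2 then some v.2 else st.2.2.2
  (mnx, mxx, mny, mxy)

def area_fecho_retangular (poligonos : List (List (Int × Int))) : Int :=
  let st := poligonos.foldl (fun st p => p.foldl pvStepA st) (none, none, none, none)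
  match st with
  | (some mnx, some mxx, some mny, some mxy) => (mxx - mnx) * (mxy - mny)
  | _ => 0  -- Python A returns the float inf here (no vertex): excluded by Pre_

-- ===== PORT B =====
def area_fecho_retangular_alt (poligonos : List (List (Int × Int))) : Int :=
  let xs := PySem.List.sorted (poligonos.flatMap (fun p => p.map Prod.fst)) (fun v => v) false
  let ys := PySem.List.sorted (poligonos.flatMap (fun p => p.map Prod.snd)) (fun v => v) false
  -- Python B's xs[-1]/xs[0] raise IndexError on an empty list (excluded by Pre_): getD 0 stands in
  ((PySem.List.pyGet? xs (-1)).getD 0 - (PySem.List.pyGet? xs 0).getD 0) *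
    ((PySem.List.pyGet? ys (-1)).getD 0 - (PySem.List.pyGet? ys 0).getD 0)

-- ===== PRECONDITION & SPEC =====
-- Pre_ excludes inputs with no vertex at all: there A returns the float inf (not an int,
-- outside the declared return type) while B's indexing xs[-1]/xs[0] raises IndexError.
def Pre_area_fecho_retangular (poligonos : List (List (Int × Int))) : Prop :=
  (poligonos.any (fun p => !p.isEmpty)) = true
instance (poligonos : List (List (Int × Int))) : Decidable (Pre_area_fecho_retangular poligonos) := by unfold Pre_area_fecho_retangular; infer_instance
def pvWitness_area_fecho_retangular : (List (List (Int × Int))) := [[(0, 0), (2, 3)]]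
def Spec_area_fecho_retangular (poligonos : List (List (Int × Int))) (out : Int) : Prop := out = area_fecho_retangular_alt poligonos
instance (poligonos : List (List (Int × Int))) (out : Int) : Decidable (Spec_area_fecho_retangular poligonos out) := by unfold Spec_area_fecho_retangular; infer_instance

-- ===== CLAIM (what is proved, stated in full; the proofs are below) =====
def Claim_equal_area_fecho_retangular : Prop := ∀ (poligonos : List (List (Int × Int))), Dom_area_fecho_retangular poligonos → Pre_area_fecho_retangular poligonos → Spec_area_fecho_retangular poligonos (area_fecho_retangular poligonos)

-- ===== LEMMAS AND PROOFS =====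

-- flatMap of a map is map of the flattened list
theorem pvFlatMap_map {α β : Type} (f : α → β) (L : List (List α)) :
    L.flatMap (fun p => p.map f) = (L.flatMap id).map f := by
  induction L with
  | nil => rfl
  | cons p t ih => simp [List.flatMap_cons, ih]

-- the nested per-polygon fold is the fold over the flattened vertex list
theorem pvFoldFlat (L : List (List (Int × Int))) (st : Option Int × Option Int × Option Int × Option Int) :
    L.foldl (fun st p => p.foldl pvStepA st) st = (L.flatMap id).foldl pvStepA st := by
  induction L generalizing st with
  | nil => rfl
  | cons p t ih => simp [List.flatMap_cons, List.foldl_append, ih]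

-- once every component is 'some', A's step is Lean's min/max
theorem pvStepA_some (a b c d : Int) (v : Int × Int) :
    pvStepA (some a, some b, some c, some d) v =
      (some (min a v.1), some (max b v.1), some (min c v.2), some (max d v.2)) := by
  simp only [pvStepA, pvLtMin, pvGtMax]
  split_ifs <;> simp_all [min_def, max_def] <;> omega

theorem pvFold_some (vs : List (Int × Int)) (a b c d : Int) :
    vs.foldl pvStepA (some a, some b, some c, some d) =
      (some ((vs.map Prod.fst).foldl min a), some ((vs.map Prod.fst).foldl max b),
       some ((vs.map Prod.snd).foldl min c), some ((vs.map Prod.snd).foldl max d)) := by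
  induction vs generalizing a b c d with
  | nil => rfl
  | cons v t ih => simp [List.foldl_cons, pvStepA_some, ih]

theorem pvFold_char (v : Int × Int) (t : List (Int × Int)) :
    (v :: t).foldl pvStepA (none, none, none, none) =
      (some ((t.map Prod.fst).foldl min v.1), some ((t.map Prod.fst).foldl max v.1),
       some ((t.map Prod.snd).foldl min v.2), some ((t.map Prod.snd).foldl max v.2)) := by
  have h1 : pvStepA (none, none, none, none) v = (some v.1, some v.1, some v.2, some v.2) := by
    simp [pvStepA, pvLtMin, pvGtMax]
  simp [List.foldl_cons, h1, pvFold_some]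

-- foldl min is a member of the list and a lower bound
theorem pvFoldlMin_mem (a : Int) (t : List Int) : t.foldl min a ∈ a :: t := by
  induction t generalizing a with
  | nil => simp
  | cons b s ih =>
    rw [List.foldl_cons]
    rcases List.mem_cons.1 (ih (min a b)) with h1 | h1
    · rw [h1]; rcases min_choice a b with hm | hm <;> simp [hm]
    · exact List.mem_cons_of_mem _ (List.mem_cons_of_mem _ h1)

theorem pvFoldlMin_le (a : Int) (t : List Int) : ∀ y ∈ a :: t, t.foldl min a ≤ y := by
  induction t generalizing a with
  | nil => simp
  | cons b s ih =>
    intro y hy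
    rw [List.foldl_cons]
    have h := ih (min a b)
    rcases List.mem_cons.1 hy with rfl | hy'
    · exact le_trans (h _ List.mem_cons_self) (min_le_left _ _)
    · rcases List.mem_cons.1 hy' with rfl | h2
      · exact le_trans (h _ List.mem_cons_self) (min_le_right _ _)
      · exact h y (List.mem_cons_of_mem _ h2)

-- foldl max is a member of the list and an upper bound
theorem pvFoldlMax_mem (a : Int) (t : List Int) : t.foldl max a ∈ a :: t := by
  induction t generalizing a with
  | nil => simp
  | cons b s ih =>
    rw [List.foldl_cons]
    rcases List.mem_cons.1 (ih (max a b)) with h1 | h1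
    · rw [h1]; rcases max_choice a b with hm | hm <;> simp [hm]
    · exact List.mem_cons_of_mem _ (List.mem_cons_of_mem _ h1)

theorem pvFoldlMax_ge (a : Int) (t : List Int) : ∀ y ∈ a :: t, y ≤ t.foldl max a := by
  induction t generalizing a with
  | nil => simp
  | cons b s ih =>
    intro y hy
    rw [List.foldl_cons]
    have h := ih (max a b)
    rcases List.mem_cons.1 hy with rfl | hy'
    · exact le_trans (le_max_left _ _) (h _ List.mem_cons_self)
    · rcases List.mem_cons.1 hy' with rfl | h2
      · exact le_trans (le_max_right _ _) (h _ List.mem_cons_self)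
      · exact h y (List.mem_cons_of_mem _ h2)

-- the head of the sorted list is the fold-min of the original nonempty list
theorem pvSortedHead (a : Int) (t : List Int) :
    (PySem.List.pyGet? (PySem.List.sorted (a :: t) (fun v => v) false) 0).getD 0 = t.foldl min a := by
  have hne : PySem.List.sorted (a :: t) (fun v => v) false ≠ [] := by
    simp [PySem.List.sorted_eq_nil_iff]
  obtain ⟨m, s, hms⟩ := List.exists_cons_of_ne_nil hne
  have hmem : m ∈ a :: t := by
    rw [← PySem.List.mem_sorted (a :: t) (fun v => v) false m, hms]
    exact List.mem_cons_self
  have hle : ∀ y ∈ a :: t, m ≤ y := PySem.List.key_head_sorted_le (a :: t) (fun v => v) hms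
  have h1 : m ≤ t.foldl min a := hle _ (pvFoldlMin_mem a t)
  have h2 : t.foldl min a ≤ m := pvFoldlMin_le a t m hmem
  rw [hms]
  simpa [PySem.List.pyGet?_zero] using le_antisymm h1 h2

-- the last element of the sorted list is the fold-max of the original nonempty list
theorem pvSortedLast (a : Int) (t : List Int) :
    (PySem.List.pyGet? (PySem.List.sorted (a :: t) (fun v => v) false) (-1)).getD 0 = t.foldl max a := by
  have hne : PySem.List.sorted (a :: t) (fun v => v) false ≠ [] := by
    simp [PySem.List.sorted_eq_nil_iff]
  have hlen : 0 < (PySem.List.sorted (a :: t) (fun v => v) false).length :=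
    List.length_pos_of_ne_nil hne
  have hlast : (PySem.List.sorted (a :: t) (fun v => v) false).getLast? =
      some ((PySem.List.sorted (a :: t) (fun v => v) false)[(PySem.List.sorted (a :: t) (fun v => v) false).length - 1]) := by
    rw [List.getLast?_eq_getElem?, List.getElem?_eq_getElem (by omega)]
  have hmemlast : (PySem.List.sorted (a :: t) (fun v => v) false)[(PySem.List.sorted (a :: t) (fun v => v) false).length - 1] ∈ a :: t := by
    rw [← PySem.List.mem_sorted (a :: t) (fun v => v) false]
    exact List.getElem_mem _
  have hub : ∀ y ∈ a :: t, y ≤ (PySem.List.sorted (a :: t) (fun v => v) false)[(PySem.List.sorted (a :: t) (fun v => v) false).length - 1] := by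
    intro y hy
    have hyL : y ∈ PySem.List.sorted (a :: t) (fun v => v) false :=
      (PySem.List.mem_sorted (a :: t) (fun v => v) false y).2 hy
    obtain ⟨i, hi, rfl⟩ := List.mem_iff_getElem.1 hyL
    exact PySem.List.key_sorted_getElem_mono (a :: t) (fun v => v) (by omega) (by omega)
  have h1 : (PySem.List.sorted (a :: t) (fun v => v) false)[(PySem.List.sorted (a :: t) (fun v => v) false).length - 1] ≤ t.foldl max a :=
    pvFoldlMax_ge a t _ hmemlast
  have h2 : t.foldl max a ≤ (PySem.List.sorted (a :: t) (fun v => v) false)[(PySem.List.sorted (a :: t) (fun v => v) false).length - 1] :=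
    hub _ (pvFoldlMax_mem a t)
  rw [PySem.List.pyGet?_neg_one, hlast]
  simpa using le_antisymm h1 h2

-- ===== VERDICT (by name: the statement is the Claim_ definition above) =====
theorem area_fecho_retangular_spec : Claim_equal_area_fecho_retangular := by
  intro poligonos _ hpre
  unfold Spec_area_fecho_retangular area_fecho_retangular area_fecho_retangular_alt
  have hne : poligonos.flatMap id ≠ [] := by
    simp only [Pre_area_fecho_retangular, List.any_eq_true] at hpre
    obtain ⟨p, hp, hne⟩ := hpre
    simp only [ne_eq, List.flatMap_eq_nil_iff]
    intro h
    exact absurd (h p hp) (by simpa using hne)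
  obtain ⟨v, t, hvt⟩ := List.exists_cons_of_ne_nil hne
  rw [pvFoldFlat, pvFlatMap_map, pvFlatMap_map, hvt, pvFold_char]
  simp only [List.map_cons]
  rw [pvSortedHead, pvSortedLast, pvSortedHead, pvSortedLast]
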